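-- pv_equiv track=rewrite | github.com/dnbaker/bonsai | python/gen_ent_table.py | gen_val
-- ===== SOURCE A (Python) =====
-- from operator import or_
-- from functools import reduce
--
-- def gen_val(i, nnucs):
--     a, c, g, t = [0] * 4
--     while nnucs:
--         val = i & 0x3
--         if val == 0:
--             a += 1
--         elif val == 1:
--             c += 1
--         elif val == 2:
--             g += 1
--         else:
--             t += 1
--         i >>= 2
--         nnucs -= 1
--     return reduce(or_,
--                   ((i << (x << 3)) for
--                    i, x in zip((a, c, g, t),
--                                range(3, -1, -1))))
-- ===== SOURCE B (Python) =====
-- def gen_val(i, nnucs):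
--     # For each of the four symbol values, count the matching positions directly
--     # (shift by 2*p, no mutation of i, no running counters), and OR the count
--     # into its 8-bit field (value 0 topmost).
--     r = 0
--     for v in range(4):
--         cnt = sum(((i >> (2 * p)) & 0x3) == v for p in range(nnucs))
--         r |= cnt << ((3 - v) << 3)
--     return r
-- ===== Notes on version B (the rewrite author's own statement) =====
-- stated objective: alternative
-- what changed: A makes one destructive pass, shifting i and incrementing one of four counters per symbol, then packs with reduce(or_); B never mutates i or keeps counters: for each value v in 0..3 it makes a separate non-destructive scan counting positions p with (i >> 2p) & 3 == v as a sum of booleans, OR-ing each count into its field as it goes (one pass with four accumulators replaced by four value-indexed passes).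
import Mathlib
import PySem

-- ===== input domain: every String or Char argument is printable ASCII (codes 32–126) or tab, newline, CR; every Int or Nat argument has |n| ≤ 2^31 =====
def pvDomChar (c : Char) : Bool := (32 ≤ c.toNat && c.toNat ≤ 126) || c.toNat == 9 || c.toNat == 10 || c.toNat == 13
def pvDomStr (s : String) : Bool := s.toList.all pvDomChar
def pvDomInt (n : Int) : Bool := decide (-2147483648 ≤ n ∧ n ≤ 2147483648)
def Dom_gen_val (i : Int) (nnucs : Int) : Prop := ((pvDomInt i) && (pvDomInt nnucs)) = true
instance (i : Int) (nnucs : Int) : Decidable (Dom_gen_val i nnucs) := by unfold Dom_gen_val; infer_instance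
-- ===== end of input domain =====

-- B replaces A's single destructive counting pass (shift i, four counters, pack at the end)
-- by four independent non-destructive scans, one per symbol value, each counting matching
-- positions via (i >> 2p) & 3 == v and OR-ing the count into its field (alternative, same cost).


-- ===== PORT A =====
-- A's `while nnucs:` loop, run nnucs.toNat times (exact for 0 ≤ nnucs; on negative nnucs the
-- Python loop never terminates, which Pre_ excludes).
def genLoopA : Nat → Int → Int → Int → Int → Int → Int × Int × Int × Int
  | 0, _, a, c, g, t => (a, c, g, t)
  | n+1, i, a, c, g, t =>
    let val := PySem.Int.band i 3
    if val = 0 then genLoopA n (i >>> 2) (a+1) c g t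
    else if val = 1 then genLoopA n (i >>> 2) a (c+1) g t
    else if val = 2 then genLoopA n (i >>> 2) a c (g+1) t
    else genLoopA n (i >>> 2) a c g (t+1)

def gen_val (i : Int) (nnucs : Int) : Int :=
  match genLoopA nnucs.toNat i 0 0 0 0 with
  | (a, c, g, t) =>
    -- reduce(or_, (i << (x << 3) for i, x in zip((a, c, g, t), range(3, -1, -1))))
    match (List.zip [a, c, g, t] [(3 : Nat), 2, 1, 0]).map
            (fun (p : Int × Nat) => p.1 <<< (p.2 <<< 3)) with
    | [] => 0
    | h :: rest => rest.foldl PySem.Int.bor h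

-- ===== PORT B =====
-- Source B: for v in range(4): cnt = sum(((i >> (2*p)) & 3) == v for p in range(nnucs));
--       r |= cnt << ((3 - v) << 3).  p ranges over 0..nnucs-1 so (2*p).toNat is exact;
--       likewise (3 - v) << 3 is ≥ 0 for v in range(4).
def gen_val_alt (i : Int) (nnucs : Int) : Int :=
  (PySem.List.pyRange 0 4 1).foldl
    (fun r v =>
      let cnt := (PySem.List.pyRange 0 nnucs 1).foldl
        (fun s p => s + (if PySem.Int.band (i >>> (2 * p).toNat) 3 = v then 1 else 0)) (0 : Int)
      PySem.Int.bor r (cnt <<< ((3 - v) <<< (3 : Nat)).toNat)) 0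

-- ===== PRECONDITION & SPEC =====
-- Pre_ excludes nnucs < 0: there A's `while nnucs:` loop never terminates (no return value).
def Pre_gen_val (i : Int) (nnucs : Int) : Prop := 0 ≤ nnucs
instance (i : Int) (nnucs : Int) : Decidable (Pre_gen_val i nnucs) := by unfold Pre_gen_val; infer_instance
def pvWitness_gen_val : Int × Int := (27, 3)

def Spec_gen_val (i : Int) (nnucs : Int) (out : Int) : Prop := out = gen_val_alt i nnucs
instance (i : Int) (nnucs : Int) (out : Int) : Decidable (Spec_gen_val i nnucs out) := by unfold Spec_gen_val; infer_instance

-- ===== CLAIM (what is proved, stated in full; the proofs are below) =====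
def Claim_equal_gen_val : Prop := ∀ (i : Int) (nnucs : Int), Dom_gen_val i nnucs → Pre_gen_val i nnucs → Spec_gen_val i nnucs (gen_val i nnucs)

-- ===== LEMMAS AND PROOFS =====

-- proof-only: the list of 2-bit symbols of i, low first
def extractL : Nat → Int → List Int
  | 0, _ => []
  | n+1, i => PySem.Int.band i 3 :: extractL n (i >>> 2)

theorem shift_shift (i : Int) (b : Nat) : (i >>> (2:Int)) >>> b = i >>> (2 + b) := by
  rw [show (2:Int) = ((2:Nat):Int) from rfl, Int.shiftRight_natCast_right]
  simp only [Int.shiftRight_eq_div_pow, pow_add]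
  push_cast
  rw [Int.ediv_ediv_of_nonneg (by positivity)]

theorem extractL_succ (n : Nat) : ∀ (i : Int),
    extractL (n+1) i = extractL n i ++ [PySem.Int.band (i >>> (2*n)) 3] := by
  induction n with
  | zero => intro i; simp [extractL]
  | succ n ih =>
    intro i
    have h2 : 2 * n + 2 = 2 * (n + 1) := by ring
    calc extractL (n+2) i
        = PySem.Int.band i 3 :: extractL (n+1) (i >>> 2) := rfl
      _ = PySem.Int.band i 3 ::
            (extractL n (i >>> 2) ++ [PySem.Int.band ((i >>> 2) >>> (2*n)) 3]) := by rw [ih]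
      _ = extractL (n+1) i ++ [PySem.Int.band (i >>> (2*(n+1))) 3] := by
            rw [shift_shift, show 2 + 2*n = 2*(n+1) from by ring]
            simp [extractL]

-- B's inner sum over range(n) counts the occurrences of v among the symbols
theorem sumB_eq (v i : Int) (n : Nat) :
    (PySem.List.pyRange 0 (n : Int) 1).foldl
      (fun s p => s + (if PySem.Int.band (i >>> (2 * p).toNat) 3 = v then 1 else 0)) (0 : Int)
    = (((extractL n i).count v : Nat) : Int) := by
  induction n with
  | zero => simp [extractL]
  | succ n ih =>
    have hr : PySem.List.pyRange 0 ((n : Int) + 1) 1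
        = PySem.List.pyRange 0 (n : Int) 1 ++ [(n : Int)] :=
      PySem.List.pyRange_one_succ_right (by positivity)
    have hc : ((n+1 : Nat) : Int) = (n : Int) + 1 := by push_cast; ring
    rw [hc, hr, List.foldl_append, ih, extractL_succ, List.count_append]
    simp only [List.foldl_cons, List.foldl_nil]
    have ht : (2 * (n : Int)).toNat = 2 * n := by omega
    rw [ht, Int.shiftRight_natCast_right]
    by_cases h : PySem.Int.band (i >>> (2*n)) 3 = v
    · push_cast; simp [h]
    · push_cast; simp [h, Ne.symm h]

theorem band_three (i : Int) : PySem.Int.band i 3 = i % 4 := by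
  unfold PySem.Int.band
  split
  · split
    · rw [show ((3:Int).toNat) = 3 from rfl,
          show (3:Nat) = 2^2 - 1 from rfl, Nat.and_two_pow_sub_one_eq_mod]
      omega
    · omega
  · split
    · rw [show ((3:Int).toNat) = 3 from rfl, Nat.and_comm,
          show (3:Nat) = 2^2 - 1 from rfl, Nat.and_two_pow_sub_one_eq_mod]
      omega
    · omega

-- A's counting loop in terms of the same symbol list
theorem genLoopA_eq (n : Nat) : ∀ (i a c g t : Int),
    genLoopA n i a c g t =
      (a + (((extractL n i).count 0 : Nat) : Int), c + (((extractL n i).count 1 : Nat) : Int),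
       g + (((extractL n i).count 2 : Nat) : Int), t + (((extractL n i).count 3 : Nat) : Int)) := by
  induction n with
  | zero => intro i a c g t; simp [genLoopA, extractL]
  | succ n ih =>
    intro i a c g t
    have hb : PySem.Int.band i 3 = i % 4 := band_three i
    have h0 : 0 ≤ i % 4 := Int.emod_nonneg i (by norm_num)
    have h4 : i % 4 < 4 := Int.emod_lt_of_pos i (by norm_num)
    have hcase : i % 4 = 0 ∨ i % 4 = 1 ∨ i % 4 = 2 ∨ i % 4 = 3 := by omega
    simp only [genLoopA, extractL, List.count_cons, hb]
    rcases hcase with h | h | h | h <;>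
      rw [h] <;> simp only [ih] <;> simp <;> ring

theorem bor_zero_left (x : Int) : PySem.Int.bor 0 x = x := by
  rw [PySem.Int.bor_comm]; exact PySem.Int.bor_zero x

-- ===== VERDICT (by name: the statement is the Claim_ definition above) =====
theorem gen_val_spec : Claim_equal_gen_val := by
  intro i nnucs _ hpre
  unfold Spec_gen_val gen_val gen_val_alt
  have hn : ((nnucs.toNat : Nat) : Int) = nnucs := Int.toNat_of_nonneg hpre
  rw [genLoopA_eq]
  rw [show PySem.List.pyRange 0 4 1 = [0, 1, 2, 3] from by decide]
  simp only [List.foldl]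
  have h0 := sumB_eq 0 i nnucs.toNat
  have h1 := sumB_eq 1 i nnucs.toNat
  have h2 := sumB_eq 2 i nnucs.toNat
  have h3 := sumB_eq 3 i nnucs.toNat
  rw [hn] at h0 h1 h2 h3
  rw [h0, h1, h2, h3]
  simp only [List.zip, List.zipWith, List.map, List.foldl, zero_add,
             bor_zero_left,
             show (((3:Int) - 0) <<< (3:Nat)).toNat = (3:Nat) <<< 3 from rfl,
             show (((3:Int) - 1) <<< (3:Nat)).toNat = (2:Nat) <<< 3 from rfl,
             show (((3:Int) - 2) <<< (3:Nat)).toNat = (1:Nat) <<< 3 from rfl,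
             show (((3:Int) - 3) <<< (3:Nat)).toNat = (0:Nat) <<< 3 from rfl]
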